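-- pv_equiv track=rewrite | github.com/maldata/advent-of-code | 2023/01/both_parts.py | get_indices_of_words
-- ===== SOURCE A (Python) =====
-- def get_indices_of_words(full_line):
--     indices_and_values = []
--     for text_num in (('one', 1), ('two', 2), ('three', 3),
--                      ('four', 4), ('five', 5), ('six', 6),
--                      ('seven', 7), ('eight', 8), ('nine', 9)):
--         idx = 0
--         while True:
--             found_idx = full_line.find(text_num[0], idx)
--             if found_idx < 0:
--                 break
--             else:
--                 indices_and_values.append((found_idx, text_num[1]))
--                 idx = found_idx + 1
--
--     return indices_and_values
-- ===== SOURCE B (Python) =====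
-- _WORDS = (('one', 1), ('two', 2), ('three', 3),
--           ('four', 4), ('five', 5), ('six', 6),
--           ('seven', 7), ('eight', 8), ('nine', 9))
--
--
-- def get_indices_of_words(full_line):
--     # Single pass over the positions of the line: whenever a digit word starts
--     # at position i, record (i, value) in that word's bucket; finally chain
--     # the buckets in value order.
--     buckets = {}
--     for i in range(len(full_line)):
--         for word, value in _WORDS:
--             if full_line.startswith(word, i):
--                 buckets.setdefault(value, []).append((i, value))
--     out = []
--     for _, value in _WORDS:
--         out += buckets.get(value, [])
--     return out
-- ===== Notes on version B (the rewrite author's own statement) =====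
-- stated objective: alternative
-- what changed: A scans the whole string nine times with find-and-restart while-loops, one pass per digit word; B makes a single pass over the positions, bucketing each startswith match in a dict keyed by the digit's value, and chains the buckets in value order.
import Mathlib
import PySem

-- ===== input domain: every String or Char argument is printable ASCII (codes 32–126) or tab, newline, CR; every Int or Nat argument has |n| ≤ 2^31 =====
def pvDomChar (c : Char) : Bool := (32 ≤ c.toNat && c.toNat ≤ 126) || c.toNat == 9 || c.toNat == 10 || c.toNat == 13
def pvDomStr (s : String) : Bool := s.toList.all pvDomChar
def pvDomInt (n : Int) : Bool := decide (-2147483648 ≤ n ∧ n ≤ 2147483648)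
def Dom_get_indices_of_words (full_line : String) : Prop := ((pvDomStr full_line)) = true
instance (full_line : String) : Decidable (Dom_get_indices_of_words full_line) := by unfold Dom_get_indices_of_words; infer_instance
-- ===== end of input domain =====

-- B replaces A's nine find-driven passes over the string by a single pass over
-- positions that buckets matches in a dict by value (objective: alternative).

-- ===== PORT A =====
-- A's inner 'while True' find loop; fuel only makes the same computation total
-- (the loop runs at most len+1 times, so fuel = len+1 never changes the value).
def pvFindLoop (s w : List Char) (v : Int) : Nat → Nat → List (Int × Int) → List (Int × Int)
  | 0, _, acc => acc
  | fuel+1, idx, acc =>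
    let found_idx := PySem.Chars.findFrom s w (idx : Int) none
    if found_idx < 0 then acc
    else pvFindLoop s w v fuel (found_idx.toNat + 1) (acc ++ [(found_idx, v)])

-- the nine (word, value) pairs, shared by both ports (A's inline tuple / B's _WORDS)
def pvWords : List (List Char × Int) :=
  [(['o','n','e'], 1), (['t','w','o'], 2), (['t','h','r','e','e'], 3),
   (['f','o','u','r'], 4), (['f','i','v','e'], 5), (['s','i','x'], 6),
   (['s','e','v','e','n'], 7), (['e','i','g','h','t'], 8), (['n','i','n','e'], 9)]

def get_indices_of_words (full_line : String) : List (Int × Int) :=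
  let s := full_line.toList
  pvWords.foldl (fun indices_and_values text_num =>
    pvFindLoop s text_num.1 text_num.2 (s.length + 1) 0 indices_and_values) []

-- ===== PORT B =====
def get_indices_of_words_alt (full_line : String) : List (Int × Int) :=
  let s := full_line.toList
  let buckets : PySem.Dict Int (List (Int × Int)) :=
    (PySem.List.pyRange 0 (s.length : Int) 1).foldl
      (fun d i => pvWords.foldl
        (fun d wv =>
          -- full_line.startswith(word, i) with 0 ≤ i: exact as a prefix test on the tail
          if PySem.Chars.startswith (s.drop i.toNat) wv.1
          then d.modify wv.2 [] (· ++ [(i, wv.2)]) else d)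
        d)
      PySem.Dict.empty
  pvWords.foldl (fun out wv => out ++ buckets.getD wv.2 []) []

-- ===== PRECONDITION & SPEC =====
def Spec_get_indices_of_words (full_line : String) (out : List (Int × Int)) : Prop := out = get_indices_of_words_alt full_line
instance (full_line : String) (out : List (Int × Int)) : Decidable (Spec_get_indices_of_words full_line out) := by unfold Spec_get_indices_of_words; infer_instance

-- ===== CLAIM (what is proved, stated in full; the proofs are below) =====
def Claim_equal_get_indices_of_words : Prop := ∀ (full_line : String), Dom_get_indices_of_words full_line → Spec_get_indices_of_words full_line (get_indices_of_words full_line)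

-- ===== LEMMAS AND PROOFS =====

-- the occurrence list of word w (paired with value v) at positions ≥ k, in position order
def pvOcc (s w : List Char) (v : Int) (k : Nat) : List (Int × Int) :=
  ((PySem.List.pyRange (k : Int) (s.length : Int) 1).filter
    (fun i => decide (w <+: s.drop i.toNat))).map (fun i => (i, v))

lemma pvOcc_eq_nil_of_not_isIn (s w : List Char) (v : Int) (k : Nat)
    (h : ¬ w <:+: s.drop k) : pvOcc s w v k = [] := by
  unfold pvOcc
  rw [List.filter_eq_nil_iff.mpr, List.map_nil]
  intro i hi
  rcases PySem.List.mem_pyRange_one.mp hi with ⟨h1, h2⟩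
  simp only [decide_eq_true_eq]
  intro hpre
  apply h
  rw [← PySem.Chars.isIn_iff_infix, ← PySem.Chars.exists_prefix_drop_iff_isIn]
  refine ⟨i.toNat - k, ?_⟩
  rw [List.drop_drop]
  have : k + (i.toNat - k) = i.toNat := by omega
  rwa [this]

lemma pvFindLoop_eq (s w : List Char) (v : Int) (hw : w ≠ []) :
    ∀ (fuel k : Nat) (acc : List (Int × Int)), k ≤ s.length →
      s.length + 1 - k ≤ fuel →
      pvFindLoop s w v fuel k acc = acc ++ pvOcc s w v k := by
  intro fuel
  induction fuel with
  | zero => intro k acc hk hf; omega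
  | succ fuel ih =>
    intro k acc hk hf
    rw [pvFindLoop]
    simp only [PySem.Chars.findFrom_natCast s w k hk]
    by_cases hfind : PySem.Chars.find (List.drop k s) w = -1
    · rw [if_pos hfind, if_pos (by norm_num)]
      rw [pvOcc_eq_nil_of_not_isIn s w v k
        ((PySem.Chars.find_eq_neg_one_iff _ _).mp hfind), List.append_nil]
    · rw [if_neg hfind]
      set m := PySem.Chars.find (List.drop k s) w with hm
      have hm0 : 0 ≤ m := by
        have := PySem.Chars.neg_one_le_find (List.drop k s) w
        omega
      have hneg : ¬ ((k : Int) + m < 0) := by omega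
      rw [if_neg hneg]
      obtain ⟨hpre, hmin⟩ := PySem.Chars.find_spec (s := List.drop k s) (sub := w) hm0
      set j := k + m.toNat with hj
      have hcast : (k : Int) + m = (j : Int) := by omega
      have hjpre : w <+: List.drop j s := by
        rw [hj, ← List.drop_drop]; exact hpre
      have hjlt : j < s.length := by
        rcases hjpre with ⟨t, ht⟩
        have : (List.drop j s).length = w.length + t.length := by rw [← ht]; simp
        have hlen : s.length - j = w.length + t.length := by simpa using this
        have : w.length ≠ 0 := by simpa using hw
        omega
      have htoNat : ((k : Int) + m).toNat = j := by omega
      have hsplit : PySem.List.pyRange (k : Int) (s.length : Int) 1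
          = PySem.List.pyRange (k : Int) (j : Int) 1 ++ ((j : Int) ::
            PySem.List.pyRange ((j : Int) + 1) (s.length : Int) 1) := by
        rw [PySem.List.pyRange_one_append (k : Int) (j : Int) (s.length : Int)
          (by omega) (by omega)]
        congr 1
        rw [PySem.List.pyRange_one_cons (by omega)]
      have hnone : ∀ i ∈ PySem.List.pyRange (k : Int) (j : Int) 1,
          ¬ (decide (w <+: s.drop i.toNat) = true) := by
        intro i hi
        rcases PySem.List.mem_pyRange_one.mp hi with ⟨h1, h2⟩
        simp only [decide_eq_true_eq]
        intro hp
        refine hmin (i.toNat - k) (by omega) ?_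
        rw [List.drop_drop]
        have : k + (i.toNat - k) = i.toNat := by omega
        rwa [this]
      have hocc : pvOcc s w v k = (((j : Nat) : Int), v) :: pvOcc s w v (j + 1) := by
        unfold pvOcc
        rw [hsplit, List.filter_append, List.filter_eq_nil_iff.mpr hnone,
          List.nil_append, List.filter_cons_of_pos (by simpa using hjpre)]
        rw [List.map_cons]
        norm_cast
      rw [htoNat, ih (j + 1) (acc ++ [((k : Int) + m, v)]) (by omega) (by omega),
        hocc, hcast]
      simp

lemma pvA_eq (full_line : String) :
    get_indices_of_words full_line
      = pvWords.flatMap (fun wv => pvOcc full_line.toList wv.1 wv.2 0) := by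
  unfold get_indices_of_words
  set s := full_line.toList
  rw [PySem.List.foldl_congr_mem pvWords _
      (fun acc wv => acc ++ pvOcc s wv.1 wv.2 0) [] ?_]
  · exact PySem.List.foldl_append_eq_flatMap _ _ _
  · intro acc wv hwv
    have hw : wv.1 ≠ [] := by
      fin_cases hwv <;> simp
    exact pvFindLoop_eq s wv.1 wv.2 hw (s.length + 1) 0 acc (by omega) (by omega)

-- a fold guarded by an if is a fold over the filtered list
lemma pvFoldlIfFilter {α β : Type} (l : List α) (P : α → Bool) (g : β → α → β) (init : β) :
    l.foldl (fun b x => if P x then g b x else b) init = (l.filter P).foldl g init := by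
  induction l generalizing init with
  | nil => rfl
  | cons x l ih =>
    by_cases hx : P x <;> simp [hx, ih]

-- a nested fold is a fold over the flattened list
lemma pvFoldlFlatMap {α β γ : Type} (l : List α) (f : α → List γ) (g : β → γ → β) (init : β) :
    l.foldl (fun b x => (f x).foldl g b) init = (l.flatMap f).foldl g init := by
  induction l generalizing init with
  | nil => rfl
  | cons x l ih => simp [List.flatMap_cons, List.foldl_append, ih]

lemma pvBuckets_eq (s : List Char) (v : Int) :
    ((PySem.List.pyRange 0 (s.length : Int) 1).foldl
      (fun d i => pvWords.foldl
        (fun d wv =>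
          if PySem.Chars.startswith (s.drop i.toNat) wv.1
          then d.modify wv.2 [] (· ++ [(i, wv.2)]) else d)
        d)
      (PySem.Dict.empty : PySem.Dict Int (List (Int × Int)))).getD v []
    = (((PySem.List.pyRange 0 (s.length : Int) 1).flatMap
        (fun i => (pvWords.filter
            (fun wv => PySem.Chars.startswith (s.drop i.toNat) wv.1)).map
          (fun wv => (wv.2, (i, wv.2))))).filter
        (fun p => p.1 == v)).map (·.2) := by
  have hstep : ∀ (d : PySem.Dict Int (List (Int × Int))) (i : Int),
      pvWords.foldl
        (fun d wv =>
          if PySem.Chars.startswith (s.drop i.toNat) wv.1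
          then d.modify wv.2 [] (· ++ [(i, wv.2)]) else d) d
      = ((pvWords.filter
            (fun wv => PySem.Chars.startswith (s.drop i.toNat) wv.1)).map
          (fun wv => ((wv.2 : Int), ((i, wv.2) : Int × Int)))).foldl
          (fun d p => d.modify p.1 [] (· ++ [p.2])) d := by
    intro d i
    rw [List.foldl_map, pvFoldlIfFilter]
  calc ((PySem.List.pyRange 0 (s.length : Int) 1).foldl
      (fun d i => pvWords.foldl
        (fun d wv =>
          if PySem.Chars.startswith (s.drop i.toNat) wv.1
          then d.modify wv.2 [] (· ++ [(i, wv.2)]) else d)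
        d)
      (PySem.Dict.empty : PySem.Dict Int (List (Int × Int)))).getD v []
      = (((PySem.List.pyRange 0 (s.length : Int) 1).flatMap
          (fun i => (pvWords.filter
              (fun wv => PySem.Chars.startswith (s.drop i.toNat) wv.1)).map
            (fun wv => (wv.2, (i, wv.2))))).foldl
          (fun d p => d.modify p.1 [] (· ++ [p.2]))
          (PySem.Dict.empty : PySem.Dict Int (List (Int × Int)))).getD v [] := by
        congr 1
        rw [← pvFoldlFlatMap]
        exact PySem.List.foldl_congr_mem _ _ _ _ (fun d i _ => hstep d i)
    _ = _ := by
        rw [PySem.Dict.getD_foldl_modify_append]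
        simp [PySem.Dict.getD, PySem.Dict.get?, PySem.Dict.empty]

-- an if-guarded singleton flatMap is a map of the filter
lemma pvFlatMapIfSingleton {α β : Type} (l : List α) (P : α → Bool) (f : α → β) :
    l.flatMap (fun x => if P x then [f x] else []) = (l.filter P).map f := by
  induction l with
  | nil => rfl
  | cons x l ih => by_cases hx : P x <;> simp [hx, ih]

-- flatMap respects pointwise-on-members equality
lemma pvFlatMapCongrMem {α β : Type} (l : List α) (f g : α → List β)
    (h : ∀ x ∈ l, f x = g x) : l.flatMap f = l.flatMap g := by
  induction l with
  | nil => rfl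
  | cons x l ih =>
    simp only [List.flatMap_cons, h x (List.mem_cons_self),
      ih (fun y hy => h y (List.mem_cons_of_mem x hy))]

-- filter-then-map distributes over a flatMap
lemma pvFilterMapFlatMap {α β γ : Type} (l : List α) (f : α → List β)
    (p : β → Bool) (g : β → γ) :
    ((l.flatMap f).filter p).map g = l.flatMap (fun x => ((f x).filter p).map g) := by
  induction l with
  | nil => rfl
  | cons x l ih => simp [List.filter_append, ih]

-- in a list with pairwise-distinct second components, filtering on a member's
-- second component keeps at most that member
lemma pvFilterValue (wv : List Char × Int) (q : List Char × Int → Bool)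
    (l : List (List Char × Int)) (hnd : (l.map Prod.snd).Nodup) (hwv : wv ∈ l) :
    l.filter (fun x => (x.2 == wv.2) && q x) = if q wv then [wv] else [] := by
  induction l with
  | nil => cases hwv
  | cons x t ih =>
    simp only [List.map_cons, List.nodup_cons] at hnd
    obtain ⟨hx, hnd'⟩ := hnd
    rw [List.filter_cons]
    rcases List.mem_cons.mp hwv with rfl | hmem
    · have hfilt : t.filter (fun y => (y.2 == wv.2) && q y) = [] := by
        apply List.filter_eq_nil_iff.mpr
        intro y hy
        have hne : y.2 ≠ wv.2 := fun h => hx (h ▸ List.mem_map_of_mem hy)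
        simp [hne]
      by_cases hq : q wv <;> simp [hq, hfilt]
    · have hne : x.2 ≠ wv.2 := by
        intro h
        exact hx (h ▸ List.mem_map_of_mem hmem)
      simp [hne, ih hnd' hmem]

lemma pvAlt_eq (full_line : String) :
    get_indices_of_words_alt full_line
      = pvWords.flatMap (fun wv => pvOcc full_line.toList wv.1 wv.2 0) := by
  unfold get_indices_of_words_alt
  set s := full_line.toList with hs
  simp only []
  rw [PySem.List.foldl_append_eq_flatMap]
  rw [List.nil_append]
  apply pvFlatMapCongrMem
  intro wv hwv
  rw [pvBuckets_eq s wv.2, pvFilterMapFlatMap]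
  have hin : ∀ i : Int,
      (((pvWords.filter
          (fun x => PySem.Chars.startswith (s.drop i.toNat) x.1)).map
            (fun x => ((x.2 : Int), ((i, x.2) : Int × Int)))).filter
          (fun p => p.1 == wv.2)).map (·.2)
      = if PySem.Chars.startswith (s.drop i.toNat) wv.1
        then [((i : Int), wv.2)] else [] := by
    intro i
    rw [List.filter_map, List.filter_filter]
    simp only [Function.comp_apply]
    rw [pvFilterValue wv (fun x => PySem.Chars.startswith (s.drop i.toNat) x.1) pvWords (by decide) hwv]
    split <;> rfl
  calc (PySem.List.pyRange 0 (s.length : Int) 1).flatMap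
        (fun i => (((pvWords.filter
            (fun x => PySem.Chars.startswith (s.drop i.toNat) x.1)).map
              (fun x => ((x.2 : Int), ((i, x.2) : Int × Int)))).filter
            (fun p => p.1 == wv.2)).map (·.2))
      = (PySem.List.pyRange 0 (s.length : Int) 1).flatMap
          (fun i => if PySem.Chars.startswith (s.drop i.toNat) wv.1
            then [((i : Int), wv.2)] else []) :=
        pvFlatMapCongrMem _ _ _ (fun i _ => hin i)
    _ = ((PySem.List.pyRange 0 (s.length : Int) 1).filter
          (fun i => PySem.Chars.startswith (s.drop i.toNat) wv.1)).map
          (fun i => (i, wv.2)) :=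
        pvFlatMapIfSingleton _ _ _
    _ = pvOcc s wv.1 wv.2 0 := by
        unfold pvOcc
        norm_num
        congr 1
        apply List.filter_congr
        intro i _
        rw [Bool.eq_iff_iff]
        constructor
        · intro h
          exact decide_eq_true ((PySem.Chars.startswith_iff _ _).mp h)
        · intro h
          exact (PySem.Chars.startswith_iff _ _).mpr (of_decide_eq_true h)

-- ===== VERDICT (by name: the statement is the Claim_ definition above) =====
theorem get_indices_of_words_spec : Claim_equal_get_indices_of_words := by
  intro full_line _
  unfold Spec_get_indices_of_words
  rw [pvA_eq, pvAlt_eq]
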